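-- pv_equiv track=rewrite | github.com/iamnotbobby/dig-tool | core/ocr.py | extract_rarity
-- ===== SOURCE A (Python) =====
-- def extract_rarity(text):
--     if not text:
--         return None
--
--     rarities = ['Junk', 'Common', 'Unusual', 'Scarce', 'Legendary', 'Mythical', 'Divine', 'Prismatic']
--     text_upper = text.upper()
--
--     found_rarities = []
--     for rarity in rarities:
--         rarity_upper = rarity.upper()
--         start_pos = 0
--         while True:
--             pos = text_upper.find(rarity_upper, start_pos)
--             if pos == -1:
--                 break
--             found_rarities.append((pos, rarity))
--             start_pos = pos + len(rarity_upper)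
--
--     if not found_rarities:
--         return None
--
--     found_rarities.sort(key=lambda x: x[0])
--
--     if len(found_rarities) == 1:
--         return found_rarities[0][1]
--     elif len(found_rarities) >= 2:
--         first_rarity = found_rarities[0][1]
--         second_rarity = found_rarities[1][1]
--
--         if first_rarity.upper() == second_rarity.upper():
--             return second_rarity  # Return duplicate (stacking case)
--         else:
--             return second_rarity  # Return second (more recent)
--
--     return found_rarities[0][1]
-- ===== SOURCE B (Python) =====
-- def extract_rarity(text):
--     if not text:
--         return None
--
--     rarities = ['Junk', 'Common', 'Unusual', 'Scarce', 'Legendary', 'Mythical', 'Divine', 'Prismatic']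
--     text_upper = text.upper()
--
--     found = []
--     for i in range(len(text_upper)):
--         if len(found) == 2:
--             break
--         for rarity in rarities:
--             if text_upper.startswith(rarity.upper(), i):
--                 found.append(rarity)
--                 break
--
--     if not found:
--         return None
--     return found[1] if len(found) >= 2 else found[0]
-- ===== Notes on version B (the rewrite author's own statement) =====
-- stated objective: alternative
-- what changed: Replaces the per-rarity find-all-occurrences loops plus a global sort with a single left-to-right positional scan (startswith at each index) that emits matches already in position order and stops after the first two; valid because no rarity keyword is a prefix of another or overlaps itself.
import Mathlib
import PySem

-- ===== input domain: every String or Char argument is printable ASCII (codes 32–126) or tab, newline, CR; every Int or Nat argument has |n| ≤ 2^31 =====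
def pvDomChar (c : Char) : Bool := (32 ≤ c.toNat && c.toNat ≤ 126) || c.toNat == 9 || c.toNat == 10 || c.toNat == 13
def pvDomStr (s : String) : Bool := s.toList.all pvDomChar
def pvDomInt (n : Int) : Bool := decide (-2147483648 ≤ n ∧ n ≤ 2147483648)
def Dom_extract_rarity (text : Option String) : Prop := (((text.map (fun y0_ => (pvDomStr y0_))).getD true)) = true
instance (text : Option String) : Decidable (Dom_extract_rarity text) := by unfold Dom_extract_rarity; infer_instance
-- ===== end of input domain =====

-- B replaces A's per-rarity find-all loops plus global sort with one left-to-right positional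
-- scan that emits matches in position order and stops after two (objective: alternative).

def pvRarities : List String :=
  ["Junk", "Common", "Unusual", "Scarce", "Legendary", "Mythical", "Divine", "Prismatic"]

-- ===== PORT A =====
-- the 'while True: pos = text_upper.find(rarity_upper, start_pos) …' loop; fuel only makes it
-- total (start_pos strictly grows each round, so tu.length + 1 rounds always suffice)
def pvFindAll (tu ru : List Char) (r : String) (start fuel : Nat) : List (Nat × String) :=
  match fuel with
  | 0 => []
  | Nat.succ f =>
    let pos := PySem.Chars.findFrom tu ru (start : Int) none
    if pos = -1 then []
    else (pos.toNat, r) :: pvFindAll tu ru r (pos.toNat + ru.length) f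

def extract_rarity (text : Option String) : Option String :=
  match text with
  | none => none
  | some t =>
    if t.toList = [] then none
    else
      let tu := PySem.Chars.upper t.toList
      let found := pvRarities.foldl
        (fun acc r => acc ++ pvFindAll tu (PySem.Chars.upper r.toList) r 0 (tu.length + 1)) []
      if found = [] then none
      else
        let sortedL := PySem.List.sorted found (fun p => p.1)
        if sortedL.length = 1 then some (sortedL.getD 0 (0, "")).2
        else if 2 ≤ sortedL.length then
          let first := (sortedL.getD 0 (0, "")).2
          let second := (sortedL.getD 1 (0, "")).2
          if PySem.Chars.upper first.toList = PySem.Chars.upper second.toList then some second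
          else some second
        else some (sortedL.getD 0 (0, "")).2

-- ===== PORT B =====
-- 'text_upper.startswith(rarity.upper(), i)' is exactly: rarity.upper() is a prefix of text_upper[i:]
def pvMatchAt (tu : List Char) (i : Nat) : Option String :=
  pvRarities.find? (fun r => PySem.Chars.startswith (tu.drop i) (PySem.Chars.upper r.toList))

def pvScan (tu : List Char) (i : Nat) (acc : List String) : List String :=
  if i < tu.length then
    if acc.length = 2 then acc
    else
      match pvMatchAt tu i with
      | some r => pvScan tu (i + 1) (acc ++ [r])
      | none => pvScan tu (i + 1) acc
  else acc
termination_by tu.length - i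

def extract_rarity_alt (text : Option String) : Option String :=
  match text with
  | none => none
  | some t =>
    if t.toList = [] then none
    else
      let tu := PySem.Chars.upper t.toList
      match pvScan tu 0 [] with
      | [] => none
      | [a] => some a
      | _ :: b :: _ => some b

-- ===== PRECONDITION & SPEC =====
def Spec_extract_rarity (text : Option String) (out : Option String) : Prop := out = extract_rarity_alt text
instance (text : Option String) (out : Option String) : Decidable (Spec_extract_rarity text out) := by unfold Spec_extract_rarity; infer_instance

-- ===== CLAIM (what is proved, stated in full; the proofs are below) =====
def Claim_equal_extract_rarity : Prop := ∀ (text : Option String), Dom_extract_rarity text → Spec_extract_rarity text (extract_rarity text)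

-- ===== LEMMAS AND PROOFS =====

-- the canonical match list, in position order, from position i on
def pvMfrom (tu : List Char) (i : Nat) : List (Nat × String) :=
  (List.range' i (tu.length - i)).filterMap (fun j => (pvMatchAt tu j).map (fun r => (j, r)))

-- concrete facts about the 8 keywords (checked by the kernel)
theorem pv_upper_ne : ∀ r ∈ pvRarities, PySem.Chars.upper r.toList ≠ [] := by decide

theorem pv_no_overlap : ∀ r ∈ pvRarities,
    ∀ d ∈ List.range (PySem.Chars.upper r.toList).length,
      d = 0 ∨ ¬ ((PySem.Chars.upper r.toList).drop d <+: PySem.Chars.upper r.toList) := by decide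

theorem pv_no_prefix : ∀ r ∈ pvRarities, ∀ r' ∈ pvRarities,
    (PySem.Chars.upper r.toList <+: PySem.Chars.upper r'.toList) → r = r' := by decide

-- a prefix of l.drop j (i ≤ j) is, shifted, a prefix of the prefix at i
theorem pv_shift {w : List Char} {l : List Char} {i j : Nat} (hij : i ≤ j)
    (hi : w <+: l.drop i) (hj : w <+: l.drop j) (hlt : j < i + w.length) :
    w.drop (j - i) <+: w := by
  obtain ⟨t, ht⟩ := hi
  have hdj : l.drop j = w.drop (j - i) ++ t := by
    have : l.drop j = (l.drop i).drop (j - i) := by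
      rw [List.drop_drop]; congr 1; omega
    rw [this, ← ht, List.drop_append_of_le_length (by omega)]
  have h1 : w.drop (j - i) <+: l.drop j := ⟨t, hdj.symm⟩
  exact List.prefix_of_prefix_length_le h1 hj (by simp only [List.length_drop]; omega)

theorem pv_occ_lt {w : List Char} {l : List Char} {i : Nat} (hw : w ≠ [])
    (h : w <+: l.drop i) : i + w.length ≤ l.length := by
  have := h.length_le
  simp [List.length_drop] at this
  rcases Nat.lt_or_ge i l.length with h1 | h1
  · omega
  · rw [List.drop_eq_nil_of_le h1] at h
    exact absurd (List.prefix_nil.mp h) hw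

-- at most one rarity matches at a position, so find? characterizes membership
theorem pv_matchAt_eq_some {tu : List Char} {i : Nat} {r : String} :
    pvMatchAt tu i = some r ↔
      r ∈ pvRarities ∧ PySem.Chars.upper r.toList <+: tu.drop i := by
  constructor
  · intro h
    refine ⟨List.mem_of_find?_eq_some h, ?_⟩
    have := List.find?_some h
    simpa [PySem.Chars.startswith_iff] using this
  · rintro ⟨hmem, hpre⟩
    have hsome : (pvMatchAt tu i).isSome := by
      apply List.find?_isSome.mpr
      exact ⟨r, hmem, by simpa [PySem.Chars.startswith_iff] using hpre⟩
    obtain ⟨r', hr'⟩ := Option.isSome_iff_exists.mp hsome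
    have hmem' := List.mem_of_find?_eq_some hr'
    have hpre' : PySem.Chars.upper r'.toList <+: tu.drop i := by
      simpa [PySem.Chars.startswith_iff] using List.find?_some hr'
    have : r' = r := by
      rcases Nat.le_total (PySem.Chars.upper r'.toList).length (PySem.Chars.upper r.toList).length with hle | hle
      · exact pv_no_prefix r' hmem' r hmem (List.prefix_of_prefix_length_le hpre' hpre hle)
      · exact (pv_no_prefix r hmem r' hmem' (List.prefix_of_prefix_length_le hpre hpre' hle)).symm
    rw [← this]; exact hr'

-- characterization of A's inner while-loop
theorem pvFindAll_eq (tu w : List Char) (hw : w ≠ [])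
    (hov : ∀ d, 0 < d → d < w.length → ¬ (w.drop d <+: w)) (r : String) :
    ∀ fuel s, s ≤ tu.length → tu.length + 1 ≤ fuel + s →
      pvFindAll tu w r s fuel =
        (List.range' s (tu.length - s)).filterMap
          (fun i => if w <+: tu.drop i then some (i, r) else none) := by
  intro fuel
  induction fuel with
  | zero => intro s hs hf; omega
  | succ f ih =>
    intro s hs hf
    by_cases hneg : PySem.Chars.findFrom tu w (s : Int) none = -1
    · have hno : ¬ w <:+: tu.drop s := (PySem.Chars.findFrom_natCast_eq_neg_one_iff tu w s hs).mp hneg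
      rw [pvFindAll]
      simp only [hneg, reduceIte]
      symm
      rw [List.filterMap_eq_nil_iff]
      intro i hi
      rw [List.mem_range'_1] at hi
      rw [if_neg]
      intro hpre
      apply hno
      apply (PySem.Chars.isIn_iff_infix _ _).mp
      apply (PySem.Chars.exists_prefix_drop_iff_isIn _ _).mp
      exact ⟨i - s, by rw [List.drop_drop]; rw [show s + (i - s) = i by omega]; exact hpre⟩
    · obtain ⟨hge, hpre, hmin⟩ := PySem.Chars.findFrom_natCast_spec tu w s hs hneg
      set p := (PySem.Chars.findFrom tu w (s : Int) none).toNat with hp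
      have hgen : s ≤ p := by omega
      have hpw : p + w.length ≤ tu.length := pv_occ_lt hw hpre
      have hwpos : 0 < w.length := List.length_pos_iff.mpr hw
      rw [pvFindAll]
      simp only [hneg, reduceIte]
      rw [ih (p + w.length) (by omega) (by omega)]
      -- split the range [s, n) into [s, p) ++ [p] ++ (p, p + |w|) ++ [p + |w|, n)
      have hsplit : List.range' s (tu.length - s) =
          List.range' s (p - s) ++ List.range' p 1 ++ List.range' (p + 1) (w.length - 1)
            ++ List.range' (p + w.length) (tu.length - (p + w.length)) := by
        have e1 := @List.range'_append s (p - s) (tu.length - p) 1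
        have e2 := @List.range'_append p 1 (tu.length - p - 1) 1
        have e3 := @List.range'_append (p + 1) (w.length - 1) (tu.length - (p + w.length)) 1
        simp only [one_mul] at e1 e2 e3
        rw [show s + (p - s) = p from by omega,
            show (p - s) + (tu.length - p) = tu.length - s from by omega] at e1
        rw [show p + 1 * 1 = p + 1 from by ring,
            show 1 + (tu.length - p - 1) = tu.length - p from by omega] at e2
        rw [show (p + 1) + (w.length - 1) = p + w.length from by omega,
            show (w.length - 1) + (tu.length - (p + w.length)) = tu.length - p - 1 from by omega] at e3
        rw [← e1, ← e2, ← e3]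
        simp [List.append_assoc]
      rw [hsplit]
      simp only [List.filterMap_append]
      have c1 : (List.range' s (p - s)).filterMap
          (fun i => if w <+: tu.drop i then some (i, r) else none) = [] := by
        rw [List.filterMap_eq_nil_iff]
        intro i hi
        rw [List.mem_range'_1] at hi
        exact if_neg (hmin i hi.1 (by omega))
      have c2 : (List.range' p 1).filterMap
          (fun i => if w <+: tu.drop i then some (i, r) else none) = [(p, r)] := by
        simp [List.range'_one, hpre]
      have c3 : (List.range' (p + 1) (w.length - 1)).filterMap
          (fun i => if w <+: tu.drop i then some (i, r) else none) = [] := by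
        rw [List.filterMap_eq_nil_iff]
        intro i hi
        rw [List.mem_range'_1] at hi
        rw [if_neg]
        intro hpre'
        exact hov (i - p) (by omega) (by omega) (pv_shift (by omega) hpre hpre' (by omega))
      rw [c1, c2, c3]
      simp only [List.nil_append, List.append_nil, List.singleton_append]
      rw [hp]
-- end pvFindAll_eq

-- A's unsorted found list is the flatMap of the per-rarity position lists
theorem pv_found_eq (tu : List Char) :
    pvRarities.foldl
      (fun acc r => acc ++ pvFindAll tu (PySem.Chars.upper r.toList) r 0 (tu.length + 1)) [] =
    pvRarities.flatMap (fun r =>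
      (List.range' 0 tu.length).filterMap
        (fun i => if PySem.Chars.upper r.toList <+: tu.drop i then some (i, r) else none)) := by
  rw [PySem.List.foldl_append_eq_flatMap]
  rw [List.nil_append]
  apply List.flatMap_congr
  intro r hr
  have := pvFindAll_eq tu (PySem.Chars.upper r.toList) (pv_upper_ne r hr)
    (fun d hd hdl => by
      rcases pv_no_overlap r hr d (List.mem_range.mpr hdl) with h | h
      · omega
      · exact h) r (tu.length + 1) 0 (Nat.zero_le _) (by omega)
  simpa using this

-- membership in A's found list
theorem pv_mem_found {tu : List Char} {p : Nat × String} :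
    p ∈ pvRarities.flatMap (fun r =>
        (List.range' 0 tu.length).filterMap
          (fun i => if PySem.Chars.upper r.toList <+: tu.drop i then some (i, r) else none)) ↔
      p.1 < tu.length ∧ p.2 ∈ pvRarities ∧ PySem.Chars.upper p.2.toList <+: tu.drop p.1 := by
  rw [List.mem_flatMap]
  constructor
  · rintro ⟨r, hr, hmem⟩
    rw [List.mem_filterMap] at hmem
    obtain ⟨i, hi, hf⟩ := hmem
    rw [List.mem_range'_1] at hi
    split_ifs at hf with hc
    all_goals cases hf
    exact ⟨by omega, hr, hc⟩
  · rintro ⟨h1, h2, h3⟩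
    refine ⟨p.2, h2, ?_⟩
    rw [List.mem_filterMap]
    exact ⟨p.1, List.mem_range'_1.mpr ⟨Nat.zero_le _, by omega⟩, by rw [if_pos h3]⟩

-- membership in the canonical match list
theorem pv_mem_M {tu : List Char} {p : Nat × String} :
    p ∈ pvMfrom tu 0 ↔
      p.1 < tu.length ∧ p.2 ∈ pvRarities ∧ PySem.Chars.upper p.2.toList <+: tu.drop p.1 := by
  unfold pvMfrom
  rw [List.mem_filterMap]
  constructor
  · rintro ⟨i, hi, hf⟩
    rw [List.mem_range'_1] at hi
    rw [Option.map_eq_some_iff] at hf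
    obtain ⟨r, hr, hpr⟩ := hf
    cases hpr
    have := pv_matchAt_eq_some.mp hr
    exact ⟨by omega, this.1, this.2⟩
  · rintro ⟨h1, h2, h3⟩
    refine ⟨p.1, List.mem_range'_1.mpr ⟨Nat.zero_le _, by omega⟩, ?_⟩
    rw [pv_matchAt_eq_some.mpr ⟨h2, h3⟩]
    simp

theorem pv_M_pairwise (tu : List Char) (i : Nat) :
    (pvMfrom tu i).Pairwise (fun a b => a.1 < b.1) := by
  unfold pvMfrom
  rw [List.pairwise_filterMap]
  apply List.Pairwise.imp_of_mem (l := List.range' i (tu.length - i))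
    (R := fun a b => a < b)
  · intro a b _ _ hab x hx y hy
    rw [Option.map_eq_some_iff] at hx hy
    obtain ⟨r, _, hr⟩ := hx
    obtain ⟨r', _, hr'⟩ := hy
    cases hr; cases hr'; exact hab
  · exact List.pairwise_lt_range' 1 Nat.one_pos

theorem pv_M_nodup (tu : List Char) : (pvMfrom tu 0).Nodup :=
  (pv_M_pairwise tu 0).imp (fun h => by intro he; rw [he] at h; omega)

theorem pv_found_nodup (tu : List Char) :
    (pvRarities.flatMap (fun r =>
      (List.range' 0 tu.length).filterMap
        (fun i => if PySem.Chars.upper r.toList <+: tu.drop i then some (i, r) else none))).Nodup := by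
  rw [List.nodup_flatMap]
  constructor
  · intro r _
    apply List.Nodup.filterMap
    · intro a a' b hb hb'
      split_ifs at hb hb' with h1 h2
      all_goals simp only [Option.mem_def, Option.some_inj] at hb hb'
      all_goals try exact absurd hb (by simp)
      all_goals try exact absurd hb' (by simp)
      rw [← hb'] at hb
      exact congrArg Prod.fst hb
    · exact List.nodup_range' 1
  · have : ∀ (r r' : String), r ≠ r' →
        (Function.onFun List.Disjoint (fun r =>
          (List.range' 0 tu.length).filterMap
            (fun i => if PySem.Chars.upper r.toList <+: tu.drop i then some (i, r) else none))) r r' := by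
      intro r r' hne p hp hp'
      rw [List.mem_filterMap] at hp hp'
      obtain ⟨i, _, hf⟩ := hp
      obtain ⟨i', _, hf'⟩ := hp'
      split_ifs at hf hf'
      all_goals simp only [Option.some_inj] at hf hf'
      rw [← hf] at hf'
      exact hne (congrArg Prod.snd hf').symm
    have hnd : pvRarities.Nodup := by decide
    exact hnd.imp (fun {a b} hab => this a b hab)

-- the sorted found list IS the canonical match list
theorem pv_sorted_eq (tu : List Char) :
    PySem.List.sorted
      (pvRarities.flatMap (fun r =>
        (List.range' 0 tu.length).filterMap
          (fun i => if PySem.Chars.upper r.toList <+: tu.drop i then some (i, r) else none)))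
      (fun p => p.1) = pvMfrom tu 0 := by
  apply PySem.List.sorted_eq_of_perm_of_pairwise_lt
  · rw [List.perm_ext_iff_of_nodup (pv_M_nodup tu) (pv_found_nodup tu)]
    intro p
    rw [pv_mem_M, pv_mem_found]
  · exact pv_M_pairwise tu 0

-- B's scan loop collects the first two canonical matches
theorem pvMfrom_cons {tu : List Char} {i : Nat} (h : i < tu.length) :
    pvMfrom tu i = ((pvMatchAt tu i).map (fun r => (i, r))).toList ++ pvMfrom tu (i + 1) := by
  unfold pvMfrom
  rw [show tu.length - i = (tu.length - (i + 1)) + 1 from by omega, List.range'_succ,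
    List.filterMap_cons]
  cases hm : pvMatchAt tu i <;> simp

theorem pvMfrom_nil {tu : List Char} {i : Nat} (h : tu.length ≤ i) : pvMfrom tu i = [] := by
  unfold pvMfrom
  rw [show tu.length - i = 0 from by omega]
  rfl

theorem pv_scan_eq (tu : List Char) :
    ∀ k i acc, tu.length - i ≤ k → acc.length ≤ 2 →
      pvScan tu i acc = (acc ++ (pvMfrom tu i).map (fun p => p.2)).take 2 := by
  intro k
  induction k with
  | zero =>
    intro i acc hk hacc
    rw [pvScan, if_neg (by omega), pvMfrom_nil (by omega)]
    rw [List.map_nil, List.append_nil, List.take_of_length_le hacc]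
  | succ k ih =>
    intro i acc hk hacc
    by_cases hi : i < tu.length
    · rw [pvScan, if_pos hi, pvMfrom_cons hi]
      by_cases h2 : acc.length = 2
      · rw [if_pos h2, List.take_append_of_le_length (by omega),
          List.take_of_length_le (by omega)]
      · rw [if_neg h2]
        cases hm : pvMatchAt tu i with
        | some r =>
          show pvScan tu (i + 1) (acc ++ [r]) = _
          rw [ih (i + 1) (acc ++ [r]) (by omega) (by simp; omega)]
          simp [List.append_assoc]
        | none =>
          show pvScan tu (i + 1) acc = _
          rw [ih (i + 1) acc (by omega) hacc]
          simp
    · rw [pvScan, if_neg hi, pvMfrom_nil (by omega)]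
      rw [List.map_nil, List.append_nil, List.take_of_length_le hacc]

theorem pv_scan_zero (tu : List Char) :
    pvScan tu 0 [] = ((pvMfrom tu 0).map (fun p => p.2)).take 2 := by
  rw [pv_scan_eq tu (tu.length) 0 [] (by omega) (by simp)]
  simp

-- ===== VERDICT (by name: the statement is the Claim_ definition above) =====
theorem extract_rarity_spec : Claim_equal_extract_rarity := by
  unfold Claim_equal_extract_rarity
  intro text _
  unfold Spec_extract_rarity
  cases text with
  | none => rfl
  | some t =>
    by_cases ht : t.toList = []
    · simp [extract_rarity, extract_rarity_alt, ht]
    · simp only [extract_rarity, extract_rarity_alt, if_neg ht]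
      rw [pv_found_eq (PySem.Chars.upper t.toList), pv_scan_zero (PySem.Chars.upper t.toList),
        pv_sorted_eq (PySem.Chars.upper t.toList)]
      have hnil : (pvRarities.flatMap (fun r =>
          (List.range' 0 (PySem.Chars.upper t.toList).length).filterMap
            (fun i => if PySem.Chars.upper r.toList <+: (PySem.Chars.upper t.toList).drop i
              then some (i, r) else none))) = [] ↔
          pvMfrom (PySem.Chars.upper t.toList) 0 = [] := by
        rw [← pv_sorted_eq (PySem.Chars.upper t.toList)]
        rw [PySem.List.sorted_eq_nil_iff]
      cases hM : pvMfrom (PySem.Chars.upper t.toList) 0 with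
      | nil =>
        rw [if_pos (hnil.mpr hM)]
        simp
      | cons x tl =>
        rw [if_neg (by rw [hnil, hM]; simp)]
        cases tl with
        | nil => simp
        | cons y rest => simp
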